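-- pv_equiv track=rewrite | github.com/miliar/Code_Jam_Webscraper | solutions_python/Problem_203/66.py | solve
-- ===== SOURCE A (Python) =====
-- def solve(r, c, s):
--     prevString = ''
--     result = []
--     prevRow = -1
--     for i in range(r):
--         row = ''
--         nowCha = ''
--         now = -1
--         for j in range(c):
--             if s[i][j] != '?':
--                 row += s[i][j]* (j - now)
--                 now = j
--                 nowCha = s[i][j]
--         if row:
--             row += nowCha  * (c-now-1)
--             for j in range(prevRow+1, i+1):
--                 result.append(row)
--             prevString = row
--             prevRow = i
--     for i in range(prevRow+1, r):
--         result.append(prevString)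
--     return result
-- ===== SOURCE B (Python) =====
-- def solve(r, c, s):
--     # Pass 1: per row of the declared r x c grid, fill each '?' with the nearest
--     # known char to its right, trailing '?'s with the row's last known char;
--     # all-'?' rows stay unresolved (None).
--     def fill(t):
--         known = [ch for ch in t if ch != '?']
--         if not known:
--             return None
--         carry = known[-1]
--         out = []
--         for ch in reversed(t):
--             if ch != '?':
--                 carry = ch
--             out.append(carry)
--         return ''.join(reversed(out))
--
--     n = max(r, 0)
--     padded = (s + [''] * n)[:n]  # the declared grid has r rows; rows beyond s are all-unknown
--     rows = [fill(t[:max(c, 0)]) for t in padded]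
--     # Pass 2: same idea vertically - unresolved rows take the nearest resolved
--     # row below, trailing unresolved rows the last resolved row ('' if none).
--     resolved = [row for row in rows if row is not None]
--     carry = resolved[-1] if resolved else ''
--     res = []
--     for row in reversed(rows):
--         if row is not None:
--             carry = row
--         res.append(carry)
--     return list(reversed(res))
-- ===== Notes on version B (the rewrite author's own statement) =====
-- stated objective: simpler
-- what changed: A builds each row left-to-right by multiplying each known char over the gap since the previous known index and back-fills whole row-gaps with append loops over index ranges; B is two symmetric right-to-left carry passes (per row over chars, then over the r rows of the declared grid) where each cell/row simply takes the nearest known value to its right, with the last known value as the initial carry.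
import Mathlib
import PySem

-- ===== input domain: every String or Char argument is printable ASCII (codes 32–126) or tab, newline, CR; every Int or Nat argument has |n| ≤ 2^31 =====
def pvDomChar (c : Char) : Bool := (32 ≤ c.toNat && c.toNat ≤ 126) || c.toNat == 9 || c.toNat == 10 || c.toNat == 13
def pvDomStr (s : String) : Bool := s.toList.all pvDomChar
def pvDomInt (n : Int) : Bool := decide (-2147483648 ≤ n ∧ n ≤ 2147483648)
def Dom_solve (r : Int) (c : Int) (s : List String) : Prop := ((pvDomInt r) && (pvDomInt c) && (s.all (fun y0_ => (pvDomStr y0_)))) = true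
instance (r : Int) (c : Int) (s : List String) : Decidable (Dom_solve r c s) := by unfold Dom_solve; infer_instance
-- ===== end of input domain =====

-- B re-implements A's gap-multiplication fill as two symmetric right-to-left carry
-- passes (per-row over chars, then over rows) on the declared r×c grid.

-- ===== PORT A =====
-- inner loop body: for j in range(c): if s[i][j] != '?': row += s[i][j]*(j-now); now = j; nowCha = s[i][j]
def innerStepA (si : List Char) (st2 : List Char × List Char × Int) (j : Int) : List Char × List Char × Int :=
  let ch := PySem.List.pyGetD si j '?'
  if ch ≠ '?' then (st2.1 ++ (List.replicate (j - st2.2.2).toNat [ch]).flatten, [ch], j)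
  else st2

-- result.append(x) repeated over a range
def appendStepA (x : String) (acc : List String) (_ : Int) : List String := acc ++ [x]

-- trailing loop: for i in range(prevRow+1, r): result.append(prevString)
def finishA (r : Int) (st : String × List String × Int) : List String :=
  (PySem.List.pyRange (st.2.2 + 1) r 1).foldl (appendStepA st.1) st.2.1

-- outer loop body over i in range(r)
def outerStepA (c : Int) (s : List String) (st : String × List String × Int) (i : Int) : String × List String × Int :=
  let si := (PySem.List.pyGetD s i "").toList
  let st2 := (PySem.List.pyRange 0 c 1).foldl (innerStepA si) ([], [], -1)
  if st2.1 ≠ [] then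
    let row2 := st2.1 ++ (List.replicate (c - st2.2.2 - 1).toNat st2.2.1).flatten
    (String.ofList row2,
     (PySem.List.pyRange (st.2.2 + 1) (i + 1) 1).foldl (appendStepA (String.ofList row2)) st.2.1,
     i)
  else st

def solve (r : Int) (c : Int) (s : List String) : List String :=
  finishA r ((PySem.List.pyRange 0 r 1).foldl (outerStepA c s) ("", ([] : List String), (-1 : Int)))

-- ===== PORT B =====
-- per-row pass: right-to-left carry of the nearest known char, seeded with the row's
-- last known char; all-'?' rows are unresolved (none)
def fillRow_alt (t : List Char) : Option (List Char) :=
  match (t.filter (fun ch => ch ≠ '?')).getLast? with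
  | none => none
  | some lastK =>
      some (t.foldr (fun ch (acc : List Char × Char) =>
              let carry := if ch ≠ '?' then ch else acc.2
              (carry :: acc.1, carry)) ([], lastK)).1

def solve_alt (r : Int) (c : Int) (s : List String) : List String :=
  let n := (max r 0).toNat
  let padded := (s ++ List.replicate n "").take n
  let rows := padded.map (fun t => fillRow_alt (t.toList.take (max c 0).toNat))
  let carry0 := ((rows.filterMap id).getLast?).getD []
  ((rows.foldr (fun row (acc : List (List Char) × List Char) =>
      let carry := match row with | some x => x | none => acc.2
      (carry :: acc.1, carry)) ([], carry0)).1).map String.ofList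

-- ===== PRECONDITION & SPEC =====
-- Pre_ is exactly the set of inputs on which A returns: for c >= 1 A raises IndexError as soon
-- as the loop index leaves s (r > len(s)) or a column index leaves a visited row (c > len(s[i]));
-- for c <= 0 the inner loop body never runs, so A never indexes s and always returns.
def Pre_solve (r : Int) (c : Int) (s : List String) : Prop :=
  c ≤ 0 ∨ (r ≤ (s.length : Int) ∧ ∀ t ∈ s.take r.toNat, c ≤ (t.toList.length : Int))
instance (r : Int) (c : Int) (s : List String) : Decidable (Pre_solve r c s) := by unfold Pre_solve; infer_instance

def pvWitness_solve : Int × Int × List String := (3, 2, ["?a", "??", "b?"])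

def Spec_solve (r : Int) (c : Int) (s : List String) (out : List String) : Prop := out = solve_alt r c s
instance (r : Int) (c : Int) (s : List String) (out : List String) : Decidable (Spec_solve r c s out) := by unfold Spec_solve; infer_instance

-- ===== CLAIM (what is proved, stated in full; the proofs are below) =====
def Claim_equal_solve : Prop := ∀ (r : Int) (c : Int) (s : List String), Dom_solve r c s → Pre_solve r c s → Spec_solve r c s (solve r c s)

-- ===== LEMMAS AND PROOFS =====

-- abstract "carry from the right" machinery shared by the proofs of both ports
def nextSome {α : Type} (xs : List (Option α)) (d : α) : α :=
  match xs with
  | [] => d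
  | none :: rest => nextSome rest d
  | some x :: _ => x

def propagate {α : Type} (xs : List (Option α)) (d : α) : List α :=
  match xs with
  | [] => []
  | o :: rest => nextSome (o :: rest) d :: propagate rest d

-- forward gap-filling (the shape of A's loops)
def fillGap {α : Type} (xs : List (Option α)) (cur : Option α) (pending : Nat) (acc : List α) : Option (List α) :=
  match xs with
  | [] => match cur with
          | none => none
          | some v => some (acc ++ List.replicate pending v)
  | none :: rest => fillGap rest cur (pending + 1) acc
  | some x :: rest => fillGap rest (some x) 0 (acc ++ List.replicate (pending + 1) x)

def enc (t : List Char) : List (Option Char) := t.map (fun ch => if ch = '?' then none else some ch)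

theorem getLastD_cons {α : Type} (x : α) (l : List α) (d : α) :
    ((x :: l).getLast?).getD d = (l.getLast?).getD x := by
  cases l with
  | nil => rfl
  | cons y l' =>
    rw [List.getLast?_cons_cons]
    obtain ⟨v, hv⟩ := Option.isSome_iff_exists.mp
      (List.getLast?_isSome.mpr (List.cons_ne_nil y l'))
    simp [hv]

theorem flat_rep {α : Type} (n : Nat) (a : α) : (List.replicate n [a]).flatten = List.replicate n a := by
  induction n with
  | zero => rfl
  | succ n ih => simp [List.replicate_succ, ih]

-- fillGap with a present carry always returns, and its value is the carry-propagation
theorem fillGap_some {α : Type} (xs : List (Option α)) :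
    ∀ (p : α) (pending : Nat) (acc : List α),
    fillGap xs (some p) pending acc =
      some (acc ++ List.replicate pending (nextSome xs (((xs.filterMap id).getLast?).getD p))
                ++ propagate xs (((xs.filterMap id).getLast?).getD p)) := by
  induction xs with
  | nil => intro p pending acc; simp [fillGap, nextSome, propagate]
  | cons o rest ih =>
    intro p pending acc
    cases o with
    | none =>
      show fillGap rest (some p) (pending + 1) acc = _
      rw [ih]
      simp [nextSome, propagate, List.replicate_succ', List.append_assoc]
    | some x =>
      show fillGap rest (some x) 0 (acc ++ List.replicate (pending + 1) x) = _
      rw [ih]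
      simp only [List.filterMap_cons, id, getLastD_cons]
      simp [nextSome, propagate, List.replicate_succ', List.append_assoc]

theorem getLast?_cons_eq {α : Type} (x : α) (l : List α) :
    ((x :: l).getLast?) = some ((l.getLast?).getD x) := by
  cases l with
  | nil => rfl
  | cons y l' =>
    rw [List.getLast?_cons_cons]
    obtain ⟨v, hv⟩ := Option.isSome_iff_exists.mp
      (List.getLast?_isSome.mpr (List.cons_ne_nil y l'))
    simp [hv]

theorem fillGap_none {α : Type} (xs : List (Option α)) :
    ∀ (pending : Nat) (acc : List α),
    fillGap xs none pending acc =
      ((xs.filterMap id).getLast?).map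
        (fun L => acc ++ List.replicate pending (nextSome xs L) ++ propagate xs L) := by
  induction xs with
  | nil => intro pending acc; rfl
  | cons o rest ih =>
    intro pending acc
    cases o with
    | none =>
      show fillGap rest none (pending + 1) acc = _
      rw [ih, List.filterMap_cons_none rfl]
      cases h : (rest.filterMap id).getLast? with
      | none => simp [h]
      | some L => simp [h, nextSome, propagate, List.replicate_succ', List.append_assoc]
    | some x =>
      show fillGap rest (some x) 0 (acc ++ List.replicate (pending + 1) x) = _
      have hfm : List.filterMap id (some x :: rest) = x :: List.filterMap id rest := by simp
      rw [fillGap_some, hfm, getLast?_cons_eq]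
      simp [nextSome, propagate, List.replicate_succ', List.append_assoc]

-- B's per-row foldr computes the right-to-left carry propagation
theorem bfoldC (t : List Char) (d : Char) :
    t.foldr (fun ch (acc : List Char × Char) =>
        let carry := if ch ≠ '?' then ch else acc.2
        (carry :: acc.1, carry)) ([], d)
      = (propagate (enc t) d, nextSome (enc t) d) := by
  induction t with
  | nil => rfl
  | cons ch rest ih =>
    rw [List.foldr_cons, ih]
    by_cases h : ch = '?' <;> simp [h, enc, propagate, nextSome]

-- B's row pass equals A's inner-loop abstraction
theorem fillRow_alt_eq (t : List Char) : fillRow_alt t = fillGap (enc t) none 0 [] := by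
  have hfm : (enc t).filterMap id = t.filter (fun ch => ch ≠ '?') := by
    induction t with
    | nil => rfl
    | cons ch rest ih => by_cases h : ch = '?' <;> simp [enc, h] <;> simpa [enc] using ih
  rw [fillGap_none, hfm]
  unfold fillRow_alt
  cases h : (t.filter (fun ch => ch ≠ '?')).getLast? with
  | none => rfl
  | some lastK =>
      have hb := bfoldC t lastK
      simp only [ne_eq, ite_not] at hb
      simp [hb]

-- B's row-level foldr is carry propagation too
theorem bfoldO (rows : List (Option (List Char))) (d : List Char) :
    rows.foldr (fun row (acc : List (List Char) × List Char) =>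
        let carry := match row with | some x => x | none => acc.2
        (carry :: acc.1, carry)) ([], d)
      = (propagate rows d, nextSome rows d) := by
  induction rows with
  | nil => rfl
  | cons o rest ih => cases o <;> rw [List.foldr_cons, ih] <;> simp [propagate, nextSome]

theorem nextSome_map {α β : Type} (g : α → β) (xs : List (Option α)) (d : α) :
    nextSome (xs.map (Option.map g)) (g d) = g (nextSome xs d) := by
  induction xs with
  | nil => rfl
  | cons o rest ih => cases o <;> simp [nextSome, ih]

theorem propagate_map {α β : Type} (g : α → β) (xs : List (Option α)) (d : α) :
    propagate (xs.map (Option.map g)) (g d) = (propagate xs d).map g := by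
  induction xs with
  | nil => rfl
  | cons o rest ih =>
    cases o <;> simp [propagate, ih, nextSome] <;> exact nextSome_map g rest d

theorem filterMap_id_map {α β : Type} (g : α → β) (xs : List (Option α)) :
    (xs.map (Option.map g)).filterMap id = (xs.filterMap id).map g := by
  induction xs with
  | nil => rfl
  | cons o rest ih => cases o <;> simp <;> simpa using ih

theorem foldl_appendStep (x : String) : ∀ (l : List Int) (acc : List String),
    l.foldl (appendStepA x) acc = acc ++ List.replicate l.length x := by
  intro l
  induction l with
  | nil => intro acc; simp
  | cons a rest ih =>
    intro acc
    rw [List.foldl_cons]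
    show List.foldl _ (acc ++ [x]) rest = _
    rw [ih]
    simp [List.replicate_succ]

theorem inner_bridge (suffix : List Char) (extra : List Char) :
    ∀ (pfx : List Char) (row nowCha : List Char) (now : Int) (cur : Option Char) (pending : Nat),
    now = (pfx.length : Int) - 1 - pending →
    ((cur = none ∧ nowCha = [] ∧ row = []) ∨ (∃ ch, cur = some ch ∧ nowCha = [ch] ∧ row ≠ [])) →
    (match fillGap (enc suffix) cur pending row with
     | none =>
        ((PySem.List.pyRange (pfx.length : Int) ((pfx.length : Int) + suffix.length) 1).foldl
          (innerStepA (pfx ++ suffix ++ extra)) (row, nowCha, now)).1 = []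
     | some v =>
        let st2 := (PySem.List.pyRange (pfx.length : Int) ((pfx.length : Int) + suffix.length) 1).foldl
          (innerStepA (pfx ++ suffix ++ extra)) (row, nowCha, now)
        st2.1 ≠ [] ∧
        st2.1 ++ (List.replicate (((pfx.length : Int) + suffix.length) - st2.2.2 - 1).toNat st2.2.1).flatten = v) := by
  induction suffix with
  | nil =>
    intro pfx row nowCha now cur pending hnow hcase
    have hnil : PySem.List.pyRange (pfx.length : Int) ((pfx.length : Int) + (([] : List Char).length : Nat)) 1 = [] := by
      simp [PySem.List.pyRange_one_eq_nil le_rfl]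
    rcases hcase with ⟨hc, hn, hr⟩ | ⟨ch, hc, hn, hr⟩
    · subst hc; subst hn; subst hr
      cases hX : fillGap (enc ([] : List Char)) none pending ([] : List Char) with
      | none => rw [hnil]; rfl
      | some v => simp [enc, fillGap] at hX
    · subst hc; subst hn
      cases hX : fillGap (enc ([] : List Char)) (some ch) pending row with
      | none => simp [enc, fillGap] at hX
      | some v =>
        simp only [enc, List.map_nil, fillGap] at hX
        rw [hnil]
        refine ⟨hr, ?_⟩
        have hcnt : ((pfx.length : Int) + ((([] : List Char).length : Nat) : Int) - now - 1).toNat = pending := by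
          simp only [List.length_nil, Nat.cast_zero, add_zero]; omega
        simp only [List.foldl_nil]
        rw [hcnt, flat_rep]
        exact Option.some.inj hX
  | cons ch rest ih =>
    intro pfx row nowCha now cur pending hnow hcase
    have hlt : (pfx.length : Int) < (pfx.length : Int) + ((ch :: rest).length : Nat) := by
      have : (0 : Int) < ((ch :: rest).length : Nat) := by exact_mod_cast Nat.succ_pos rest.length
      omega
    have hget : PySem.List.pyGetD (pfx ++ (ch :: rest) ++ extra) (pfx.length : Int) '?' = ch := by
      rw [List.append_assoc, PySem.List.pyGetD_natCast]; simp
    have h1 : (pfx.length : Int) + 1 = (((pfx ++ [ch]).length : Nat) : Int) := by simp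
    have h2 : (pfx.length : Int) + ((ch :: rest).length : Nat)
        = (((pfx ++ [ch]).length : Nat) : Int) + (rest.length : Nat) := by
      simp only [List.length_cons, List.length_append, List.length_nil]; push_cast; ring
    have happ : pfx ++ (ch :: rest) ++ extra = (pfx ++ [ch]) ++ rest ++ extra := by simp
    rw [PySem.List.pyRange_one_cons hlt, List.foldl_cons]
    by_cases hch : ch = '?'
    · have hstep : innerStepA (pfx ++ (ch :: rest) ++ extra) (row, nowCha, now) (pfx.length : Int) = (row, nowCha, now) := by
        simp [innerStepA, hget, hch]
      have hfg : fillGap (enc (ch :: rest)) cur pending row = fillGap (enc rest) cur (pending + 1) row := by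
        simp [enc, hch, fillGap]
      rw [hstep, hfg, h1, h2, happ]
      exact ih (pfx ++ [ch]) row nowCha now cur (pending + 1)
        (by simp only [List.length_append, List.length_cons, List.length_nil]; push_cast; omega) hcase
    · have hrep : ((pfx.length : Int) - now).toNat = pending + 1 := by omega
      have hstep : innerStepA (pfx ++ (ch :: rest) ++ extra) (row, nowCha, now) (pfx.length : Int)
          = (row ++ List.replicate (pending + 1) ch, [ch], (pfx.length : Int)) := by
        simp [innerStepA, hget, hch, hrep, flat_rep]
      have hfg : fillGap (enc (ch :: rest)) cur pending row
          = fillGap (enc rest) (some ch) 0 (row ++ List.replicate (pending + 1) ch) := by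
        simp [enc, hch, fillGap]
      rw [hstep, hfg, h1, h2, happ]
      exact ih (pfx ++ [ch]) (row ++ List.replicate (pending + 1) ch) [ch] (pfx.length : Int) (some ch) 0
        (by simp only [List.length_append, List.length_cons, List.length_nil]; push_cast; omega)
        (Or.inr ⟨ch, rfl, rfl, by simp⟩)

theorem outer_bridge (suffix : List String) (c : Int) (extra : List String) :
    ∀ (pfx : List String) (prevString : String) (result : List String) (prevRow : Int) (pending : Nat),
    (∀ t ∈ suffix, c ≤ (t.toList.length : Int)) →
    prevRow = (pfx.length : Int) - 1 - pending →
    finishA ((pfx.length : Int) + suffix.length)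
      ((PySem.List.pyRange (pfx.length : Int) ((pfx.length : Int) + suffix.length) 1).foldl
        (outerStepA c (pfx ++ suffix ++ extra)) (prevString, result, prevRow))
    = (fillGap (suffix.map (fun t => (fillGap (enc (t.toList.take c.toNat)) none 0 []).map String.ofList))
        (some prevString) pending result).getD [] := by
  induction suffix with
  | nil =>
    intro pfx prevString result prevRow pending _ hnow
    have hnil : PySem.List.pyRange (pfx.length : Int) ((pfx.length : Int) + (([] : List String).length : Nat)) 1 = [] := by
      simp [PySem.List.pyRange_one_eq_nil le_rfl]
    rw [hnil, List.foldl_nil]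
    unfold finishA
    rw [foldl_appendStep, PySem.List.length_pyRange_one]
    have hcnt : ((pfx.length : Int) + ((([] : List String).length : Nat) : Int) - (prevRow + 1)).toNat = pending := by
      simp only [List.length_nil, Nat.cast_zero, add_zero]; omega
    rw [hcnt]
    rfl
  | cons t rest ih =>
    intro pfx prevString result prevRow pending hsuf hnow
    have hcle : c ≤ ((t.toList.length : Nat) : Int) := hsuf t List.mem_cons_self
    obtain ⟨w, e, hwe, hwlen⟩ : ∃ w e, t.toList = w ++ e ∧ w.length = c.toNat :=
      ⟨t.toList.take c.toNat, t.toList.drop c.toNat, (List.take_append_drop c.toNat t.toList).symm,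
       by simp only [List.length_take]; omega⟩
    have htake : t.toList.take c.toNat = w := by rw [hwe, ← hwlen, List.take_left]
    have hlt : (pfx.length : Int) < (pfx.length : Int) + ((t :: rest).length : Nat) := by
      have : (0 : Int) < ((t :: rest).length : Nat) := by exact_mod_cast Nat.succ_pos rest.length
      omega
    have hget : PySem.List.pyGetD (pfx ++ (t :: rest) ++ extra) (pfx.length : Int) "" = t := by
      rw [List.append_assoc, PySem.List.pyGetD_natCast]; simp
    have h1 : (pfx.length : Int) + 1 = (((pfx ++ [t]).length : Nat) : Int) := by simp
    have h2 : (pfx.length : Int) + ((t :: rest).length : Nat)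
        = (((pfx ++ [t]).length : Nat) : Int) + (rest.length : Nat) := by
      simp only [List.length_cons, List.length_append, List.length_nil]; push_cast; ring
    have happ : pfx ++ (t :: rest) ++ extra = (pfx ++ [t]) ++ rest ++ extra := by simp
    have hrange : PySem.List.pyRange 0 c 1 = PySem.List.pyRange 0 ((w.length : Nat) : Int) 1 := by
      by_cases hc : 0 ≤ c
      · congr 1; omega
      · rw [PySem.List.pyRange_one_eq_nil (by omega), PySem.List.pyRange_one_eq_nil (by omega)]
    rw [PySem.List.pyRange_one_cons hlt, List.foldl_cons]
    have hib := inner_bridge w e [] [] [] (-1) none 0 (by simp) (Or.inl ⟨rfl, rfl, rfl⟩)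
    simp only [List.length_nil, Nat.cast_zero, zero_add, List.nil_append] at hib
    cases hX : fillGap (enc w) none 0 [] with
    | none =>
      rw [hX] at hib
      have hstep : outerStepA c (pfx ++ (t :: rest) ++ extra)
          (prevString, result, prevRow) (pfx.length : Int) = (prevString, result, prevRow) := by
        simp only [outerStepA, hget]
        rw [hwe, hrange]
        exact if_neg (fun hne => hne hib)
      rw [hstep, h1, h2, happ]
      have hmap : ((t :: rest).map (fun t => (fillGap (enc (t.toList.take c.toNat)) none 0 []).map String.ofList))
          = none :: rest.map (fun t => (fillGap (enc (t.toList.take c.toNat)) none 0 []).map String.ofList) := by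
        simp [htake, hX]
      rw [hmap]
      show finishA _ _ = (fillGap _ (some prevString) (pending + 1) result).getD []
      exact ih (pfx ++ [t]) prevString result prevRow (pending + 1) (fun u hu => hsuf u (List.mem_cons_of_mem t hu))
        (by simp only [List.length_append, List.length_cons, List.length_nil]; push_cast; omega)
    | some v =>
      rw [hX] at hib
      have hwne : w ≠ [] := by
        intro hnil'
        rw [hnil'] at hX
        simp [enc, fillGap] at hX
      have hcpos : c = ((w.length : Nat) : Int) := by
        have : 0 < w.length := List.length_pos_iff.mpr hwne
        omega
      have hcnt : ((pfx.length : Int) + 1 - (prevRow + 1)).toNat = pending + 1 := by omega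
      have hstep : outerStepA c (pfx ++ (t :: rest) ++ extra)
          (prevString, result, prevRow) (pfx.length : Int)
          = (String.ofList v, result ++ List.replicate (pending + 1) (String.ofList v), (pfx.length : Int)) := by
        simp only [outerStepA, hget]
        rw [hwe, hrange, hcpos]
        rw [if_pos hib.1, hib.2, foldl_appendStep, PySem.List.length_pyRange_one, hcnt]
      rw [hstep, h1, h2, happ]
      have hmap : ((t :: rest).map (fun t => (fillGap (enc (t.toList.take c.toNat)) none 0 []).map String.ofList))
          = some (String.ofList v) :: rest.map (fun t => (fillGap (enc (t.toList.take c.toNat)) none 0 []).map String.ofList) := by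
        simp [htake, hX]
      rw [hmap]
      show finishA _ _ = (fillGap _ (some (String.ofList v)) 0 (result ++ List.replicate (pending + 1) (String.ofList v))).getD []
      exact ih (pfx ++ [t]) (String.ofList v) (result ++ List.replicate (pending + 1) (String.ofList v))
        (pfx.length : Int) 0 (fun u hu => hsuf u (List.mem_cons_of_mem t hu))
        (by simp only [List.length_append, List.length_cons, List.length_nil]; push_cast; omega)

-- the r×c-grid core: both programs agree whenever A's loops stay inside s
theorem solve_eq_of (r : Int) (c : Int) (s : List String)
    (hr : r ≤ (s.length : Int)) (hlen : ∀ t ∈ s.take r.toNat, c ≤ (t.toList.length : Int)) :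
    solve r c s = solve_alt r c s := by
  by_cases hr0 : 0 ≤ r
  · have hlen' : ((s.take r.toNat).length : Int) = r := by
      simp only [List.length_take]; omega
    have hA := outer_bridge (s.take r.toNat) c (s.drop r.toNat) [] "" [] (-1) 0 hlen (by simp)
    simp only [List.length_nil, Nat.cast_zero, zero_add, List.nil_append, List.take_append_drop] at hA
    rw [hlen'] at hA
    unfold solve
    rw [hA, fillGap_some]
    simp only [List.replicate_zero, List.nil_append, List.append_nil, Option.getD_some]
    have hmaxr : (max r 0).toNat = r.toNat := by omega
    have hmaxc : (max c 0).toNat = c.toNat := by omega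
    have hpad : (s ++ List.replicate (max r 0).toNat "").take (max r 0).toNat = s.take r.toNat := by
      rw [List.take_append_of_le_length (by omega), hmaxr]
    have hrows : (s.take r.toNat).map (fun t => (fillGap (enc (t.toList.take c.toNat)) none 0 []).map String.ofList)
        = ((s.take r.toNat).map (fun t => fillRow_alt (t.toList.take c.toNat))).map (Option.map String.ofList) := by
      rw [List.map_map]
      exact List.map_congr_left (fun t _ => by simp only [Function.comp_apply]; rw [fillRow_alt_eq])
    rw [hrows, filterMap_id_map, List.getLast?_map]
    have hLL : (((((s.take r.toNat).map (fun t => fillRow_alt (t.toList.take c.toNat))).filterMap id).getLast?).map String.ofList).getD ""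
        = String.ofList (((((s.take r.toNat).map (fun t => fillRow_alt (t.toList.take c.toNat))).filterMap id).getLast?).getD []) := by
      cases (((s.take r.toNat).map (fun t => fillRow_alt (t.toList.take c.toNat))).filterMap id).getLast? <;> simp
    rw [hLL, propagate_map]
    have hb := bfoldO ((s.take r.toNat).map (fun t => fillRow_alt (t.toList.take c.toNat)))
        (((((s.take r.toNat).map (fun t => fillRow_alt (t.toList.take c.toNat))).filterMap id).getLast?).getD [])
    simp only [solve_alt, hpad, hmaxc]
    rw [hb]
  · have hrneg : PySem.List.pyRange 0 r 1 = [] := PySem.List.pyRange_one_eq_nil (by omega)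
    have hrt : (max r 0).toNat = 0 := by omega
    unfold solve finishA
    rw [hrneg, List.foldl_nil]
    show List.foldl _ _ (PySem.List.pyRange (-1 + 1) r 1) = _
    rw [show (-1 + 1 : Int) = 0 from by norm_num, hrneg, List.foldl_nil]
    simp [solve_alt, hrt]

-- behaviour of both programs when c <= 0 (no column is ever inspected)
theorem foldl_fix {α β : Type} (f : α → β → α) (init : α) (hf : ∀ b, f init b = init) :
    ∀ l : List β, l.foldl f init = init := by
  intro l
  induction l with
  | nil => rfl
  | cons b rest ih => rw [List.foldl_cons, hf b, ih]

theorem solve_c_nonpos (r : Int) (c : Int) (s : List String) (hc : c ≤ 0) :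
    solve r c s = List.replicate r.toNat "" := by
  have hcnil : PySem.List.pyRange 0 c 1 = [] := PySem.List.pyRange_one_eq_nil (by omega)
  have hstep : ∀ i, outerStepA c s ("", ([] : List String), (-1 : Int)) i = ("", [], -1) := by
    intro i
    simp [outerStepA, hcnil]
  unfold solve
  rw [foldl_fix _ _ hstep]
  unfold finishA
  rw [show ((-1 : Int) + 1) = 0 from by norm_num, foldl_appendStep, PySem.List.length_pyRange_one]
  simp

theorem nextSome_replicate_none {α : Type} (d : α) : ∀ n : Nat,
    nextSome (List.replicate n (none : Option α)) d = d := by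
  intro n
  induction n with
  | zero => rfl
  | succ m ihm => simpa [List.replicate_succ, nextSome] using ihm

theorem propagate_replicate_none {α : Type} (n : Nat) (d : α) :
    propagate (List.replicate n (none : Option α)) d = List.replicate n d := by
  induction n with
  | zero => rfl
  | succ n ih =>
    rw [List.replicate_succ, List.replicate_succ, ← ih]
    show nextSome (none :: List.replicate n none) d :: _ = _
    congr 1
    exact nextSome_replicate_none d n

theorem alt_c_nonpos (r : Int) (c : Int) (s : List String) (hc : c ≤ 0) :
    solve_alt r c s = List.replicate r.toNat "" := by
  have hct : (max c 0).toNat = 0 := by omega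
  have hplen : ((s ++ List.replicate (max r 0).toNat "").take (max r 0).toNat).length = r.toNat := by
    simp only [List.length_take, List.length_append, List.length_replicate]
    omega
  have hrows : ((s ++ List.replicate (max r 0).toNat "").take (max r 0).toNat).map
        (fun t => fillRow_alt (t.toList.take (max c 0).toNat))
      = List.replicate r.toNat none := by
    rw [hct, ← hplen]
    simp [List.eq_replicate_iff, fillRow_alt]
  simp only [solve_alt, hrows]
  have hb := bfoldO (List.replicate r.toNat none)
      (((List.replicate r.toNat (none : Option (List Char))).filterMap id).getLast?.getD [])
  rw [hb]
  simp [propagate_replicate_none]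

-- ===== VERDICT (by name: the statement is the Claim_ definition above) =====
theorem solve_spec : Claim_equal_solve := by
  intro r c s _ hpre
  show solve r c s = solve_alt r c s
  rcases hpre with hc0 | ⟨hr, hlen⟩
  · rw [solve_c_nonpos r c s hc0, alt_c_nonpos r c s hc0]
  · exact solve_eq_of r c s hr hlen
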